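-- pv_equiv track=rewrite | github.com/KeemHD/Interview-Question | Interview_Practice_Question.py | pal_check
-- ===== SOURCE A (Python) =====
-- def pal_check(start, end,s):
--     status = True
--
--     while start < end:
--         if s[start] != s[end]:
--             status = False
--
--         start +=1
--         end -= 1
--
--     return status
-- ===== SOURCE B (Python) =====
-- def pal_check(start, end, s):
--     if start >= end:
--         return True
--     return s[start] == s[end] and pal_check(start + 1, end - 1, s)
-- ===== Notes on version B (the rewrite author's own statement) =====
-- stated objective: simpler
-- what changed: Replaced the while-loop with a status flag (which keeps scanning after a mismatch) by a recursive two-pointer check that short-circuits on the first mismatch.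
import Mathlib
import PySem

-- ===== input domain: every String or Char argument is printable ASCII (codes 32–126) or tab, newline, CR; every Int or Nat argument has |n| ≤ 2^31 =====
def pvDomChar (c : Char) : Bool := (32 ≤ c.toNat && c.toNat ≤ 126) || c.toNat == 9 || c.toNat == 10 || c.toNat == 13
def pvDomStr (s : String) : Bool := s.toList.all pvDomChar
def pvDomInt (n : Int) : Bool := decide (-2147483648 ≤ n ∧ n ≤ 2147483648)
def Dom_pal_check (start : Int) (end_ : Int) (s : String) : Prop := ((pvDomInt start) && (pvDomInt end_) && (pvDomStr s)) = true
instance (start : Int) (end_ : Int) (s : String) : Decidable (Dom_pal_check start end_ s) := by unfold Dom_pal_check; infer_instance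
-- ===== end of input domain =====

-- B replaces A's while-loop with a status flag (which keeps scanning after a mismatch) by a
-- recursive two-pointer check that short-circuits on the first mismatch; equal on all inputs
-- where A returns (Pre_), i.e. where no index raises.

-- ===== PORT A =====
-- the while loop: state is (start, end, status); 'none' from pyGet? = IndexError (outside Pre_)
def pal_check_go (start : Int) (end_ : Int) (s : String) (status : Bool) : Bool :=
  if _h : start < end_ then
    match PySem.Str.pyGet? s start, PySem.Str.pyGet? s end_ with
    | some a, some b =>
        pal_check_go (start + 1) (end_ - 1) s (if a ≠ b then false else status)
    | _, _ => false   -- Python raises IndexError here; excluded by Pre_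
  else status
termination_by (end_ - start).toNat
decreasing_by omega

def pal_check (start : Int) (end_ : Int) (s : String) : Bool :=
  pal_check_go start end_ s true

-- ===== PORT B =====
def pal_check_alt (start : Int) (end_ : Int) (s : String) : Bool :=
  if _h : start ≥ end_ then true
  else
    match PySem.Str.pyGet? s start, PySem.Str.pyGet? s end_ with
    | some a, some b => a == b && pal_check_alt (start + 1) (end_ - 1) s
    | _, _ => false   -- Python raises IndexError here; excluded by Pre_
termination_by (end_ - start).toNat
decreasing_by omega

-- ===== PRECONDITION & SPEC =====
-- Pre_ excludes exactly the inputs on which A raises IndexError: when the loop runs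
-- (start < end_), every accessed index lies in [start, end_], so all accesses succeed
-- iff start and end_ are both valid Python indices into s.
def Pre_pal_check (start : Int) (end_ : Int) (s : String) : Prop :=
  end_ ≤ start ∨ (-(s.toList.length : Int) ≤ start ∧ end_ < (s.toList.length : Int))
instance (start : Int) (end_ : Int) (s : String) : Decidable (Pre_pal_check start end_ s) := by
  unfold Pre_pal_check; infer_instance

def pvWitness_pal_check : Int × Int × String := (0, 4, "abcba")

def Spec_pal_check (start : Int) (end_ : Int) (s : String) (out : Bool) : Prop :=
  out = pal_check_alt start end_ s
instance (start : Int) (end_ : Int) (s : String) (out : Bool) : Decidable (Spec_pal_check start end_ s out) := by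
  unfold Spec_pal_check; infer_instance

-- ===== CLAIM (what is proved, stated in full; the proofs are below) =====
def Claim_equal_pal_check : Prop := ∀ (start : Int) (end_ : Int) (s : String), Dom_pal_check start end_ s → Pre_pal_check start end_ s → Spec_pal_check start end_ s (pal_check start end_ s)

-- ===== LEMMAS AND PROOFS =====

-- A valid Python index into s yields a character.
theorem pyGet?_isSome_of_inrange (s : String) (i : Int)
    (h1 : -(s.toList.length : Int) ≤ i) (h2 : i < (s.toList.length : Int)) :
    ∃ c, PySem.Str.pyGet? s i = some c := by
  have hne : PySem.Str.pyGet? s i ≠ none := by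
    simp only [PySem.Str.pyGet?_eq, PySem.Chars.pyGet?_eq_listPyGet?]
    intro hn
    exact ((PySem.List.pyGet?_eq_none_iff _ _).mp hn) ⟨h1, h2⟩
  exact Option.ne_none_iff_exists'.mp hne

-- Loop invariant: the loop with status flag equals status && (short-circuit recursion),
-- on every loop state whose remaining accesses stay in range.
theorem go_eq_and_alt (s : String) :
    ∀ (n : Nat) (start end_ : Int), (end_ - start).toNat ≤ n →
      Pre_pal_check start end_ s →
      ∀ status, pal_check_go start end_ s status = (status && pal_check_alt start end_ s) := by
  intro n
  induction n with
  | zero =>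
    intro start end_ hn _ status
    rw [pal_check_go, pal_check_alt]
    have hle : end_ ≤ start := by omega
    simp [hle, not_lt.mpr hle]
  | succ n ih =>
    intro start end_ hn hpre status
    rw [pal_check_go, pal_check_alt]
    by_cases hlt : start < end_
    · have hrange : -(s.toList.length : Int) ≤ start ∧ end_ < (s.toList.length : Int) := by
        rcases hpre with h | h
        · omega
        · exact h
      obtain ⟨a, ha⟩ := pyGet?_isSome_of_inrange s start (by omega) (by omega)
      obtain ⟨b, hb⟩ := pyGet?_isSome_of_inrange s end_ (by omega) (by omega)
      have hpre' : Pre_pal_check (start + 1) (end_ - 1) s := by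
        unfold Pre_pal_check
        omega
      have hrec := ih (start + 1) (end_ - 1) (by omega) hpre'
      simp only [hlt, dite_true, not_le.mpr hlt, dite_false, ha, hb]
      rw [hrec]
      by_cases hab : a = b
      · simp [hab]
      · simp [hab]
    · have hge : start ≥ end_ := by omega
      simp [hlt, hge]

-- ===== VERDICT (by name: the statement is the Claim_ definition above) =====
theorem pal_check_spec : Claim_equal_pal_check := by
  intro start end_ s _hdom hpre
  unfold Spec_pal_check pal_check
  have h := go_eq_and_alt s (end_ - start).toNat start end_ le_rfl hpre true
  simpa using h
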